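-- pv_equiv track=rewrite | github.com/Shimwell/paramak-2 | src/paramak/utils.py | sum_after_plasma
-- ===== SOURCE A (Python) =====
-- def sum_after_plasma(radial_build):
--     plasma_found = False
--     total_sum = 0
--     for item in radial_build:
--         if plasma_found:
--             total_sum += item[1]
--         if item[0] == "plasma":
--             plasma_found = True
--     return total_sum
-- ===== SOURCE B (Python) =====
-- def sum_after_plasma(radial_build):
--     for i, item in enumerate(radial_build):
--         if item[0] == "plasma":
--             return sum(it[1] for it in radial_build[i + 1:])
--     return 0
-- ===== Notes on version B (the rewrite author's own statement) =====
-- stated objective: simpler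
-- what changed: Replaces the flag-carrying stateful pass with 'locate the first plasma marker, then sum the second components of the suffix after it' (early return; 0 when no marker).
import Mathlib
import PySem

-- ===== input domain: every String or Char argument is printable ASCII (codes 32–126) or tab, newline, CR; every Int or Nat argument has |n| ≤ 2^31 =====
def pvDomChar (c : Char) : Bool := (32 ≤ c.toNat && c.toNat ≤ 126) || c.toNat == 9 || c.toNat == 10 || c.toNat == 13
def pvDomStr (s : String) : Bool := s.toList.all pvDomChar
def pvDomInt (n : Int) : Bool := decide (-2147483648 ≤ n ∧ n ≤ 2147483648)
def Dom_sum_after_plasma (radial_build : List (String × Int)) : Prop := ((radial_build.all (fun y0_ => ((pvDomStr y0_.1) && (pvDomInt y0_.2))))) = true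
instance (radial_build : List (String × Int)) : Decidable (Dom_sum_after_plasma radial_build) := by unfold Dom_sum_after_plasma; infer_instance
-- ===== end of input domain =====

-- B restructures A's single flag-guarded pass into: find the first "plasma" marker, then sum the suffix after it. Same values everywhere.

-- ===== PORT A =====
-- A: one pass carrying (plasma_found, total_sum); add item[1] when the flag is set, then set the flag on "plasma".
-- loop body of A (one step: add when the flag is set, then update the flag)
def pvStepA (st : Bool × Int) (item : String × Int) : Bool × Int :=
  let total_sum := if st.1 then st.2 + item.2 else st.2
  let plasma_found := if item.1 = "plasma" then true else st.1
  (plasma_found, total_sum)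

def sum_after_plasma (radial_build : List (String × Int)) : Int :=
  (radial_build.foldl pvStepA (false, 0)).2

-- ===== PORT B =====
-- B's helper: sum of second components of a list (Python's sum over the suffix).
def pvSumSnd (xs : List (String × Int)) : Int := (xs.map Prod.snd).sum

-- B: scan for the first "plasma" item (the enumerate loop with early return); on hit, sum the remaining suffix; else 0.
def sum_after_plasma_alt (radial_build : List (String × Int)) : Int :=
  match radial_build with
  | [] => 0
  | item :: rest => if item.1 = "plasma" then pvSumSnd rest else sum_after_plasma_alt rest

-- ===== PRECONDITION & SPEC =====
def Spec_sum_after_plasma (radial_build : List (String × Int)) (out : Int) : Prop := out = sum_after_plasma_alt radial_build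
instance (radial_build : List (String × Int)) (out : Int) : Decidable (Spec_sum_after_plasma radial_build out) := by unfold Spec_sum_after_plasma; infer_instance

-- ===== CLAIM (what is proved, stated in full; the proofs are below) =====
def Claim_equal_sum_after_plasma : Prop := ∀ (radial_build : List (String × Int)), Dom_sum_after_plasma radial_build → Spec_sum_after_plasma radial_build (sum_after_plasma radial_build)

-- ===== LEMMAS AND PROOFS =====

-- Once the flag is true, A's fold just accumulates the sum of the second components.
theorem foldA_true (xs : List (String × Int)) (acc : Int) :
    xs.foldl pvStepA (true, acc) = (true, acc + pvSumSnd xs) := by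
  induction xs generalizing acc with
  | nil => simp [pvSumSnd]
  | cons x xs ih =>
    rw [List.foldl_cons, show pvStepA (true, acc) x = (true, acc + x.2) from by
      simp [pvStepA], ih]
    simp [pvSumSnd, add_assoc]

-- While the flag is false, A's fold computes B's recursion (offset by the accumulator).
theorem foldA_false (xs : List (String × Int)) (acc : Int) :
    (xs.foldl pvStepA (false, acc)).2 = acc + sum_after_plasma_alt xs := by
  induction xs generalizing acc with
  | nil => simp [sum_after_plasma_alt]
  | cons x xs ih =>
    rw [List.foldl_cons]
    by_cases h : x.1 = "plasma"
    · rw [show pvStepA (false, acc) x = (true, acc) from by simp [pvStepA, h],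
        foldA_true]
      simp [sum_after_plasma_alt, h]
    · rw [show pvStepA (false, acc) x = (false, acc) from by simp [pvStepA, h], ih]
      simp [sum_after_plasma_alt, h]

-- ===== VERDICT (by name: the statement is the Claim_ definition above) =====
theorem sum_after_plasma_spec : Claim_equal_sum_after_plasma := by
  intro rb _
  show sum_after_plasma rb = sum_after_plasma_alt rb
  simpa [sum_after_plasma] using foldA_false rb 0
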